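-- pv_equiv track=rewrite | github.com/KiyoLelou10/RAGforRIOTOS | DocumentationRAG/RIOTDocuChunker2.py | _extract_title_and_section
-- ===== SOURCE A (Python) =====
-- from typing import List, Dict, Any, Optional, Tuple
--
-- def _extract_title_and_section(content: str) -> Tuple[str, str]:
--     """Extract title and current section from content"""
--     lines = content.split('\n')
--     title = "Unknown"
--     section = "Unknown"
--
--     # Look for title in first few lines
--     for i, line in enumerate(lines[:10]):
--         line = line.strip()
--         if line and not line.startswith('#'):
--             title = line[:100]  # Limit title length
--             break
--
--     # Look for section headers
--     for line in lines:
--         if line.startswith('#') or line.startswith('**'):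
--             section = line.strip('#* ')[:100]
--             break
--
--     return title, section
-- ===== SOURCE B (Python) =====
-- def _extract_title_and_section(content: str):
--     title = "Unknown"
--     section = "Unknown"
--     title_found = False
--     section_found = False
--     for i, line in enumerate(content.split('\n')):
--         if not title_found and i < 10:
--             stripped = line.strip()
--             if stripped and not stripped.startswith('#'):
--                 title = stripped[:100]
--                 title_found = True
--         if not section_found and (line.startswith('#') or line.startswith('**')):
--             section = line.strip('#* ')[:100]
--             section_found = True
--         if title_found and section_found:
--             break
--     return title, section
-- ===== Notes on version B (the rewrite author's own statement) =====
-- stated objective: alternative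
-- what changed: A's two sequential scans (one over lines[:10] for the title, one over all lines for the section) are fused into a single pass over enumerate(lines) maintaining two found-flags, breaking early once both are set.
import Mathlib
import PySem

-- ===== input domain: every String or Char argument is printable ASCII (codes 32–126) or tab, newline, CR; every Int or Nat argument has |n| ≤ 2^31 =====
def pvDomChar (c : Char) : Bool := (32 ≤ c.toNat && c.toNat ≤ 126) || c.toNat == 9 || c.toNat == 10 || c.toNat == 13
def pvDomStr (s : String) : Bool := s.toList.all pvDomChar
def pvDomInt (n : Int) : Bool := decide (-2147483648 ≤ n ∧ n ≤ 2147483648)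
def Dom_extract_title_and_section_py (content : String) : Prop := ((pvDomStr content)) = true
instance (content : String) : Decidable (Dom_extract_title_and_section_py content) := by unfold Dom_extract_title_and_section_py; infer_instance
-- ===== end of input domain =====

-- ===== PORT A =====
-- B re-implements A's two sequential scans (title over lines[:10], section over all
-- lines) as ONE pass with found-flags and an early break; equivalence proved (objective: alternative).

-- first loop of A: title from the first stripped non-empty line not starting with '#'
def pvTitleLoop : List String → String
  | [] => "Unknown"
  | l :: ls =>
    let line := PySem.Str.strip l
    if line ≠ "" ∧ PySem.Str.startswith line "#" = false
    then PySem.Str.slice line none (some 100)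
    else pvTitleLoop ls

-- second loop of A: section from the first line starting with '#' or '**'
def pvSecLoop : List String → String
  | [] => "Unknown"
  | l :: ls =>
    if PySem.Str.startswith l "#" = true ∨ PySem.Str.startswith l "**" = true
    then PySem.Str.slice (PySem.Str.stripChars l "#* ") none (some 100)
    else pvSecLoop ls

def extract_title_and_section_py (content : String) : String × String :=
  let lines := (PySem.Str.split? content "\n").getD []   -- split('\n'), sep ≠ "" so never none
  (pvTitleLoop (PySem.List.slice lines none (some 10)), pvSecLoop lines)

-- ===== PORT B =====
-- single loop over enumerate(lines); t?/s? = none encodes title_found/section_found = False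
def pvLoopB : List String → Nat → Option String → Option String → String × String
  | [], _, t?, s? => (t?.getD "Unknown", s?.getD "Unknown")
  | l :: ls, i, t?, s? =>
    let t? := if t? = none ∧ i < 10 ∧
                 (let st := PySem.Str.strip l
                  st ≠ "" ∧ PySem.Str.startswith st "#" = false)
              then some (PySem.Str.slice (PySem.Str.strip l) none (some 100))
              else t?
    let s? := if s? = none ∧ (PySem.Str.startswith l "#" = true ∨ PySem.Str.startswith l "**" = true)
              then some (PySem.Str.slice (PySem.Str.stripChars l "#* ") none (some 100))
              else s?
    match t?, s? with
    | some t, some s => (t, s)   -- break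
    | t?, s? => pvLoopB ls (i + 1) t? s?

def extract_title_and_section_py_alt (content : String) : String × String :=
  pvLoopB ((PySem.Str.split? content "\n").getD []) 0 none none

-- ===== PRECONDITION & SPEC =====
def Spec_extract_title_and_section_py (content : String) (out : String × String) : Prop := out = extract_title_and_section_py_alt content
instance (content : String) (out : String × String) : Decidable (Spec_extract_title_and_section_py content out) := by unfold Spec_extract_title_and_section_py; infer_instance

-- ===== CLAIM (what is proved, stated in full; the proofs are below) =====
def Claim_equal_extract_title_and_section_py : Prop := ∀ (content : String), Dom_extract_title_and_section_py content → Spec_extract_title_and_section_py content (extract_title_and_section_py content)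

-- ===== LEMMAS AND PROOFS =====

-- A's title loop fires on a line iff its strip is nonempty and not '#'-prefixed
lemma pvTitle_fire (l : String) (ls : List String) (i : Nat) (hi : i < 10)
    (hc : let st := PySem.Str.strip l
          st ≠ "" ∧ PySem.Str.startswith st "#" = false) :
    pvTitleLoop (List.take (10 - i) (l :: ls)) =
      PySem.Str.slice (PySem.Str.strip l) none (some 100) := by
  have h : 10 - i = (10 - (i + 1)) + 1 := by omega
  rw [h, List.take_succ_cons, pvTitleLoop, if_pos hc]

lemma pvTitle_skip (l : String) (ls : List String) (i : Nat)
    (hc : ¬ (i < 10 ∧ (let st := PySem.Str.strip l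
          st ≠ "" ∧ PySem.Str.startswith st "#" = false))) :
    pvTitleLoop (List.take (10 - i) (l :: ls)) =
      pvTitleLoop (List.take (10 - (i + 1)) ls) := by
  by_cases hi : i < 10
  · have h : 10 - i = (10 - (i + 1)) + 1 := by omega
    rw [h, List.take_succ_cons, pvTitleLoop, if_neg (fun hcd => hc ⟨hi, hcd⟩)]
  · have h1 : 10 - i = 0 := by omega
    have h2 : 10 - (i + 1) = 0 := by omega
    rw [h1, h2, List.take_zero, List.take_zero]

lemma pvSec_fire (l : String) (ls : List String)
    (h : PySem.Str.startswith l "#" = true ∨ PySem.Str.startswith l "**" = true) :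
    pvSecLoop (l :: ls) = PySem.Str.slice (PySem.Str.stripChars l "#* ") none (some 100) := by
  rw [pvSecLoop, if_pos h]

lemma pvSec_skip (l : String) (ls : List String)
    (h : ¬ (PySem.Str.startswith l "#" = true ∨ PySem.Str.startswith l "**" = true)) :
    pvSecLoop (l :: ls) = pvSecLoop ls := by
  rw [pvSecLoop, if_neg h]

-- invariant of B's fused loop: each optional state, once set, is final; while unset it
-- is computed by the corresponding loop of A over the lines that remain in its window
lemma pvLoopB_eq (ls : List String) (i : Nat) (t? s? : Option String) :
    pvLoopB ls i t? s? =
      (t?.getD (pvTitleLoop (ls.take (10 - i))), s?.getD (pvSecLoop ls)) := by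
  induction ls generalizing i t? s? with
  | nil => simp [pvLoopB, pvTitleLoop, pvSecLoop]
  | cons l ls ih =>
    rw [pvLoopB]
    rcases t? with _ | tv <;> rcases s? with _ | sv
    · -- neither found yet
      split_ifs with h1 h2 h2
      · show (PySem.Str.slice (PySem.Str.strip l) none (some 100),
              PySem.Str.slice (PySem.Str.stripChars l "#* ") none (some 100)) = _
        simp only [Option.getD]
        rw [pvTitle_fire l ls i h1.2.1 h1.2.2, pvSec_fire l ls h2.2]
      · show pvLoopB ls (i + 1) (some _) none = _
        rw [ih]
        simp only [Option.getD]
        rw [pvTitle_fire l ls i h1.2.1 h1.2.2, pvSec_skip l ls (fun h => h2 ⟨rfl, h⟩)]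
      · show pvLoopB ls (i + 1) none (some _) = _
        rw [ih]
        simp only [Option.getD]
        rw [pvTitle_skip l ls i (fun h => h1 ⟨rfl, h.1, h.2⟩), pvSec_fire l ls h2.2]
      · show pvLoopB ls (i + 1) none none = _
        rw [ih]
        simp only [Option.getD]
        rw [pvTitle_skip l ls i (fun h => h1 ⟨rfl, h.1, h.2⟩),
            pvSec_skip l ls (fun h => h2 ⟨rfl, h⟩)]
    · -- section already found
      simp only [reduceCtorEq, false_and, if_false]
      split_ifs with h1
      · show (PySem.Str.slice (PySem.Str.strip l) none (some 100), sv) = _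
        simp only [Option.getD]
        rw [pvTitle_fire l ls i h1.2.1 h1.2.2]
      · show pvLoopB ls (i + 1) none (some sv) = _
        rw [ih]
        simp only [Option.getD]
        rw [pvTitle_skip l ls i (fun h => h1 ⟨trivial, h.1, h.2⟩)]
    · -- title already found
      simp only [reduceCtorEq, false_and, if_false]
      split_ifs with h2
      · show (tv, PySem.Str.slice (PySem.Str.stripChars l "#* ") none (some 100)) = _
        simp only [Option.getD]
        rw [pvSec_fire l ls h2.2]
      · show pvLoopB ls (i + 1) (some tv) none = _
        rw [ih]
        simp only [Option.getD]
        rw [pvSec_skip l ls (fun h => h2 ⟨trivial, h⟩)]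
    · -- both already found: break immediately
      simp only [reduceCtorEq, false_and, if_false]
      show (tv, sv) = _
      simp only [Option.getD]

-- ===== VERDICT (by name: the statement is the Claim_ definition above) =====
theorem extract_title_and_section_py_spec : Claim_equal_extract_title_and_section_py := by
  intro content _
  unfold Spec_extract_title_and_section_py extract_title_and_section_py extract_title_and_section_py_alt
  rw [pvLoopB_eq]
  show (pvTitleLoop (PySem.List.slice _ none (some 10)), _) = _
  rw [PySem.List.slice_to _ (by norm_num)]
  rfl
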